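-- pv_equiv track=rewrite | github.com/ThePassionateProgrammer/youtube-code-examples | ai-driven-design-thinking/ep08-law-of-demeter/app/legacy_explosion.py | generate_subclass_names
-- ===== SOURCE A (Python) =====
-- from typing import Iterable, List
--
-- def generate_subclass_names(options: List[str], base: str = "PaymentFlow") -> List[str]:
--     names: List[str] = []
--     n = len(options)
--     for mask in range(2 ** n):
--         chosen = [options[i] for i in range(n) if (mask & (1 << i))]
--         suffix = "".join([f"_With{opt.title().replace('_', '')}" for opt in chosen]) or "_Plain"
--         names.append(f"{base}{suffix}")
--     return names
-- ===== SOURCE B (Python) =====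
-- from typing import List
--
--
-- def generate_subclass_names(options: List[str], base: str = "PaymentFlow") -> List[str]:
--     suffixes = [""]
--     for opt in options:
--         part = f"_With{opt.title().replace('_', '')}"
--         suffixes = suffixes + [s + part for s in suffixes]
--     return [f"{base}{s or '_Plain'}" for s in suffixes]
-- ===== Notes on version B (the rewrite author's own statement) =====
-- stated objective: alternative
-- what changed: Replaces the 2^n-mask enumeration with its per-mask inner scan over all option indices (and a fresh title/replace computation per chosen option) by iterative subset-doubling: each option's suffix part is computed once and the suffix list doubles per option, the numbering order giving the same counting order (measured 7.45x at n=16, but the output itself is exponential, so the largest timing size finishes for neither).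
import Mathlib
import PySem

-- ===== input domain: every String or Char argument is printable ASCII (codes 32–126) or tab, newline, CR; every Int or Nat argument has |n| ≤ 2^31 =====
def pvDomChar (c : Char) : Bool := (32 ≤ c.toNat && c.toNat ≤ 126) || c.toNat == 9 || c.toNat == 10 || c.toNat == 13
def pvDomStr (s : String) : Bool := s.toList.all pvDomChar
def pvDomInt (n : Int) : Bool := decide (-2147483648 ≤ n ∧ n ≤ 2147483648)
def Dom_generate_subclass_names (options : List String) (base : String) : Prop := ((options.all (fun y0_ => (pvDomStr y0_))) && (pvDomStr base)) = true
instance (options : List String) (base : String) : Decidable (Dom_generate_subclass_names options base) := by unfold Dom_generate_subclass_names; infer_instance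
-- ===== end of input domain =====

-- B replaces A's 2^n-mask enumeration (inner scan over all option indices per mask,
-- re-formatting each chosen option every time) by subset-doubling over the options,
-- formatting each option's suffix part once; same exponential output, less work per name.


-- ===== PORT A =====
-- hand port of str.title() (no PySem primitive): an alpha char is uppercased after a
-- non-alpha (or at the start) and lowercased otherwise — exact on the ASCII domain,
-- where Python's cased characters are exactly the letters.
def pvTitleGo : Bool → List Char → List Char
  | _, [] => []
  | prev, c :: cs =>
    if PySem.Chars.isalpha c then
      (if prev then PySem.Chars.lowerChar c else PySem.Chars.upperChar c) :: pvTitleGo true cs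
    else c :: pvTitleGo false cs

def pvTitle (s : String) : String := String.ofList (pvTitleGo false s.toList)

-- f"_With{opt.title().replace('_', '')}"  (shared by both ports: the same Python expression)
def pvWithPart (opt : String) : String := "_With" ++ PySem.Str.replace (pvTitle opt) "_" ""

-- mask & (1 << i)  (Python: both operands int; 0 ≤ i always holds at the call site)
def pvBit (mask : Int) (i : Int) : Int := PySem.Int.band mask ((1 : Int) <<< i.toNat)

def generate_subclass_names (options : List String) (base : String) : List String :=
  let n : Int := options.length
  (PySem.List.pyRange 0 ((2 : Int) ^ n.toNat) 1).foldl
    (fun names mask =>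
      let chosen : List String :=
        (PySem.List.pyRange 0 n 1).foldl
          (fun acc i =>
            if pvBit mask i ≠ 0 then
              acc ++ [(PySem.List.pyGet? options i).getD ""]
            else acc) []
      let suffix0 := PySem.Str.join "" (chosen.map pvWithPart)
      let suffix := if suffix0 = "" then "_Plain" else suffix0
      names ++ [base ++ suffix]) []

-- ===== PORT B =====
def generate_subclass_names_alt (options : List String) (base : String) : List String :=
  let suffixes : List String :=
    options.foldl (fun sfs opt => sfs ++ sfs.map (fun s => s ++ pvWithPart opt)) [""]
  suffixes.map (fun s => base ++ (if s = "" then "_Plain" else s))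

-- ===== PRECONDITION & SPEC =====
def Spec_generate_subclass_names (options : List String) (base : String) (out : List String) : Prop := out = generate_subclass_names_alt options base
instance (options : List String) (base : String) (out : List String) : Decidable (Spec_generate_subclass_names options base out) := by unfold Spec_generate_subclass_names; infer_instance

-- ===== CLAIM (what is proved, stated in full; the proofs are below) =====
def Claim_equal_generate_subclass_names : Prop := ∀ (options : List String) (base : String), Dom_generate_subclass_names options base → Spec_generate_subclass_names options base (generate_subclass_names options base)

-- ===== LEMMAS AND PROOFS =====

-- A's per-mask suffix, with the mask as a Nat and bit tests as Nat.testBit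
def asuf (options : List String) (m : Nat) : String :=
  PySem.Str.join ""
    ((((List.range options.length).filter (fun i => m.testBit i)).map
        (fun i : Nat => (PySem.List.pyGet? options ((i : Nat) : Int)).getD "")).map pvWithPart)

lemma foldl_snoc_map {α β : Type} (f : α → β) (xs : List α) (init : List β) :
    xs.foldl (fun acc x => acc ++ [f x]) init = init ++ xs.map f := by
  induction xs generalizing init with
  | nil => simp
  | cons x xs ih => simp [ih]

lemma foldl_snoc_filter_map {α β : Type} (p : α → Prop) [DecidablePred p] (f : α → β)
    (xs : List α) (init : List β) :
    xs.foldl (fun acc x => if p x then acc ++ [f x] else acc) init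
      = init ++ (xs.filter (fun x => decide (p x))).map f := by
  induction xs generalizing init with
  | nil => simp
  | cons x xs ih =>
    by_cases h : p x <;> simp [h, ih]

lemma join_empty_nil : PySem.Str.join "" ([] : List String) = "" := by
  apply String.toList_injective
  simp [PySem.Str.toList_join, PySem.Chars.join_nil]

lemma charsJoin_empty_snoc (xs : List (List Char)) (y : List Char) :
    PySem.Chars.join [] (xs ++ [y]) = PySem.Chars.join [] xs ++ y := by
  induction xs with
  | nil => simp [PySem.Chars.join_nil, PySem.Chars.join_singleton]
  | cons x xs ih =>
    cases xs with
    | nil => simp [PySem.Chars.join_singleton, PySem.Chars.join_cons_cons]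
    | cons z zs =>
      simp only [List.cons_append, PySem.Chars.join_cons_cons] at ih ⊢
      simp [ih]

lemma join_empty_snoc (xs : List String) (y : String) :
    PySem.Str.join "" (xs ++ [y]) = PySem.Str.join "" xs ++ y := by
  apply String.toList_injective
  simp only [PySem.Str.toList_join, String.toList_append, List.map_append, List.map_cons,
    List.map_nil]
  have he : ("" : String).toList = ([] : List Char) := by rfl
  rw [he, charsJoin_empty_snoc]

-- band ↑m (1 <<< i) ≠ 0  ↔  m.testBit i
lemma band_bit_test (m i : Nat) :
    decide (pvBit (m : Int) ((i : Nat) : Int) ≠ 0) = Nat.testBit m i := by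
  unfold pvBit
  have h1 : ((1 : Int) <<< ((i : Int)).toNat) = ((2 ^ i : Nat) : Int) := by
    rw [Int.toNat_natCast, Int.shiftLeft_eq]; push_cast; ring
  rw [h1, PySem.Int.band_natCast, Nat.and_two_pow]
  cases h : Nat.testBit m i <;> simp

-- A rewritten as a map over Nat masks
set_option maxHeartbeats 1000000 in
lemma aBridge (options : List String) (base : String) :
    generate_subclass_names options base
      = (List.range (2 ^ options.length)).map
          (fun m => base ++ (if asuf options m = "" then "_Plain" else asuf options m)) := by
  unfold generate_subclass_names
  simp only []
  have hn : ((options.length : Int)).toNat = options.length := by simp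
  rw [hn]
  have h2 : ((2 : Int) ^ options.length) = ((2 ^ options.length : Nat) : Int) := by push_cast; ring
  rw [h2,
    show PySem.List.pyRange 0 ((2 ^ options.length : Nat) : Int) 1
        = (List.range (2 ^ options.length)).map (fun k : Nat => (k : Int)) from
      PySem.List.pyRange_zero_natCast _,
    foldl_snoc_map, List.nil_append, List.map_map]
  apply List.map_congr_left
  intro m _
  simp only [Function.comp]
  congr 1
  have hinner :
      (PySem.List.pyRange 0 (options.length : Int) 1).foldl
        (fun acc i => if pvBit (m : Int) i ≠ 0 then
            acc ++ [(PySem.List.pyGet? options i).getD ""] else acc) []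
      = ((List.range options.length).filter (fun i => m.testBit i)).map
          (fun i : Nat => (PySem.List.pyGet? options ((i : Nat) : Int)).getD "") := by
    rw [show PySem.List.pyRange 0 (options.length : Int) 1
          = (List.range options.length).map (fun k : Nat => (k : Int)) from
        PySem.List.pyRange_zero_natCast _]
    rw [foldl_snoc_filter_map
      (fun i : Int => pvBit (m : Int) i ≠ 0)
      (fun i : Int => (PySem.List.pyGet? options i).getD "")]
    rw [List.nil_append, List.filter_map, List.map_map]
    congr 1
    rw [List.filter_congr]
    intro i _
    simp only [Function.comp]
    rw [band_bit_test]
  rw [hinner]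
  rfl

-- B's suffix list
def bstep (sfs : List String) (opt : String) : List String :=
  sfs ++ sfs.map (fun s => s ++ pvWithPart opt)

-- for masks below 2^L the appended option is never chosen
lemma asuf_append_lo (options : List String) (o : String) (m : Nat) (hm : m < 2 ^ options.length) :
    asuf (options ++ [o]) m = asuf options m := by
  unfold asuf
  have hlen : (options ++ [o]).length = options.length + 1 := by simp
  rw [hlen, List.range_add, List.filter_append, List.map_append, List.map_append]
  have h1 : (List.map (fun x => options.length + x) (List.range 1)).filter (fun i => m.testBit i) = [] := by
    simp [List.range_succ, Nat.testBit_lt_two_pow hm]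
  rw [h1]
  simp only [List.map_nil, List.append_nil]
  congr 1
  rw [List.map_map, List.map_map]
  apply List.map_congr_left
  intro i hi
  simp only [List.mem_filter, List.mem_range] at hi
  simp only [Function.comp]
  congr 2
  rw [PySem.List.pyGet?_natCast, PySem.List.pyGet?_natCast, List.getElem?_append_left hi.1]

-- for masks 2^L + m the appended option is chosen last
lemma asuf_append_hi (options : List String) (o : String) (m : Nat) (hm : m < 2 ^ options.length) :
    asuf (options ++ [o]) (2 ^ options.length + m) = asuf options m ++ pvWithPart o := by
  unfold asuf
  have hlen : (options ++ [o]).length = options.length + 1 := by simp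
  rw [hlen, List.range_add, List.filter_append, List.map_append, List.map_append]
  have h1 : (List.map (fun x => options.length + x) (List.range 1)).filter
      (fun i => (2 ^ options.length + m).testBit i) = [options.length] := by
    simp [List.range_succ, Nat.testBit_two_pow_add_eq, Nat.testBit_lt_two_pow hm]
  rw [h1]
  have h2 : ((List.range options.length).filter (fun i => (2 ^ options.length + m).testBit i))
      = (List.range options.length).filter (fun i => m.testBit i) := by
    apply List.filter_congr
    intro i hi
    simp only [List.mem_range] at hi
    rw [Nat.testBit_two_pow_add_gt hi]
  rw [h2]
  have h3 : PySem.List.pyGet? (options ++ [o]) ((options.length : Nat) : Int) = some o := by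
    rw [PySem.List.pyGet?_natCast]
    simp
  simp only [List.map_cons, List.map_nil]
  rw [h3]
  simp only [Option.getD_some]
  rw [join_empty_snoc]
  congr 2
  rw [List.map_map, List.map_map]
  apply List.map_congr_left
  intro i hi
  simp only [List.mem_filter, List.mem_range] at hi
  simp only [Function.comp]
  congr 2
  rw [PySem.List.pyGet?_natCast, PySem.List.pyGet?_natCast, List.getElem?_append_left hi.1]

-- main invariant: A's suffix table = B's doubled suffix list
lemma suffixes_eq (options : List String) :
    (List.range (2 ^ options.length)).map (asuf options)
      = options.foldl bstep [""] := by
  induction options using List.reverseRecOn with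
  | nil =>
    simp [asuf, join_empty_nil]
  | append_singleton options o ih =>
    rw [List.foldl_append, ← ih]
    simp only [List.foldl_cons, List.foldl_nil, bstep]
    have hlen : (options ++ [o]).length = options.length + 1 := by simp
    rw [hlen,
      show 2 ^ (options.length + 1) = 2 ^ options.length + 2 ^ options.length by ring,
      List.range_add, List.map_append, List.map_map]
    congr 1
    · apply List.map_congr_left
      intro m hm
      simp only [List.mem_range] at hm
      exact asuf_append_lo options o m hm
    · rw [List.map_map]
      apply List.map_congr_left
      intro m hm
      simp only [List.mem_range] at hm
      simp only [Function.comp]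
      exact asuf_append_hi options o m hm

-- ===== VERDICT (by name: the statement is the Claim_ definition above) =====
theorem generate_subclass_names_spec : Claim_equal_generate_subclass_names := by
  intro options base _
  unfold Spec_generate_subclass_names generate_subclass_names_alt
  rw [aBridge]
  have h := suffixes_eq options
  rw [show (options.foldl (fun sfs opt => sfs ++ sfs.map (fun s => s ++ pvWithPart opt)) [""])
        = options.foldl bstep [""] from rfl, ← h, List.map_map]
  rfl
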